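-- pv_equiv track=rewrite | github.com/lyksj200/RNADesign_scripts | eval_metrics.py | recursive_perm
-- ===== SOURCE A (Python) =====
-- from itertools import permutations
--
-- def recursive_perm(intervals, cur_idx=0):
--     if cur_idx >= len(intervals):
--         return [()]
--     ret = []
--     for cur_perm in permutations(intervals[cur_idx]):
--         for right in recursive_perm(intervals, cur_idx + 1):
--             ret.append(cur_perm + right)
--     return ret
-- ===== SOURCE B (Python) =====
-- from itertools import permutations, product
--
-- def recursive_perm(intervals, cur_idx=0):
--     pools = []
--     i = cur_idx
--     while i < len(intervals):
--         pools.append(permutations(intervals[i]))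
--         i += 1
--     return [sum(combo, ()) for combo in product(*pools)]
-- ===== Notes on version B (the rewrite author's own statement) =====
-- stated objective: idiomatic
-- what changed: Replaced the recursive per-interval branching with a single iterative driver: collect one itertools.permutations iterator per remaining interval index, take their itertools.product, and flatten each resulting combination of tuples by summing it into one tuple.
import Mathlib
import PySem

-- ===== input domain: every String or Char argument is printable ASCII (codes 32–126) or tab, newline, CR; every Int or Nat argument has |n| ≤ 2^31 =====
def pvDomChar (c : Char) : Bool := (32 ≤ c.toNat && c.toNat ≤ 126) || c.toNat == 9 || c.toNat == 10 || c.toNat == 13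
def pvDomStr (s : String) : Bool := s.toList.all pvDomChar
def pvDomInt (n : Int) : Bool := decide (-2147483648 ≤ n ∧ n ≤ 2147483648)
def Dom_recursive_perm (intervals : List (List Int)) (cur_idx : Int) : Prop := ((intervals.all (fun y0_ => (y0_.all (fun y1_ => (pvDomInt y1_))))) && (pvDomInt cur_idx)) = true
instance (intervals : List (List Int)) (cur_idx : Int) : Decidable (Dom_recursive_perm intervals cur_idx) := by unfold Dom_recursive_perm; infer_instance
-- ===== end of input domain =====

-- B replaces A's recursion by one iterative driver: per-index permutation pools,
-- their Cartesian product, each combination flattened; objective: idiomatic.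

-- itertools.permutations in Python's order (by index, leftmost varying slowest),
-- shared by both ports since both Pythons call itertools.permutations.
def pySelect : List Int → List (Int × List Int)
  | [] => []
  | x :: rest => (x, rest) :: (pySelect rest).map (fun p => (p.1, x :: p.2))

def pyPermsAux : Nat → List Int → List (List Int)
  | 0, _ => [[]]
  | n + 1, xs => (pySelect xs).flatMap (fun p => (pyPermsAux n p.2).map (fun t => p.1 :: t))

def pyPerms (xs : List Int) : List (List Int) := pyPermsAux xs.length xs

-- ===== PORT A =====
def recursive_perm (intervals : List (List Int)) (cur_idx : Int) : List (List Int) :=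
  if _h : cur_idx ≥ (intervals.length : Int) then [[]]
  else
    match PySem.List.pyGet? intervals cur_idx with
    | none => []  -- IndexError in Python; excluded by Pre_
    | some cur =>
      (pyPerms cur).foldl
        (fun ret cur_perm =>
          (recursive_perm intervals (cur_idx + 1)).foldl
            (fun ret right => ret ++ [cur_perm ++ right]) ret)
        []
termination_by ((intervals.length : Int) - cur_idx).toNat
decreasing_by omega

-- ===== PORT B =====
-- the while loop: pools.append(permutations(intervals[i])); i += 1
def pvPoolsB (intervals : List (List Int)) (i : Int) : List (List (List Int)) :=
  if _h : i < (intervals.length : Int) then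
    (match PySem.List.pyGet? intervals i with
     | none => []  -- IndexError in Python; excluded by Pre_
     | some iv => pyPerms iv) :: pvPoolsB intervals (i + 1)
  else []
termination_by ((intervals.length : Int) - i).toNat
decreasing_by omega

-- itertools.product (rightmost iterator advances fastest)
def pyProduct : List (List (List Int)) → List (List (List Int))
  | [] => [[]]
  | pool :: rest => pool.flatMap (fun x => (pyProduct rest).map (fun combo => x :: combo))

def recursive_perm_alt (intervals : List (List Int)) (cur_idx : Int) : List (List Int) :=
  (pyProduct (pvPoolsB intervals cur_idx)).map
    (fun combo => combo.foldl (· ++ ·) ([] : List Int))  -- sum(combo, ())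

-- ===== PRECONDITION & SPEC =====
-- Python A raises IndexError (intervals[cur_idx]) exactly when cur_idx < -len(intervals); B raises there too.
def Pre_recursive_perm (intervals : List (List Int)) (cur_idx : Int) : Prop :=
  -(intervals.length : Int) ≤ cur_idx
instance (intervals : List (List Int)) (cur_idx : Int) : Decidable (Pre_recursive_perm intervals cur_idx) := by unfold Pre_recursive_perm; infer_instance

def pvWitness_recursive_perm : List (List Int) × Int := ([[1, 2], [3]], 0)

def Spec_recursive_perm (intervals : List (List Int)) (cur_idx : Int) (out : List (List Int)) : Prop := out = recursive_perm_alt intervals cur_idx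
instance (intervals : List (List Int)) (cur_idx : Int) (out : List (List Int)) : Decidable (Spec_recursive_perm intervals cur_idx out) := by unfold Spec_recursive_perm; infer_instance

-- ===== CLAIM (what is proved, stated in full; the proofs are below) =====
def Claim_equal_recursive_perm : Prop := ∀ (intervals : List (List Int)) (cur_idx : Int), Dom_recursive_perm intervals cur_idx → Pre_recursive_perm intervals cur_idx → Spec_recursive_perm intervals cur_idx (recursive_perm intervals cur_idx)

-- ===== LEMMAS AND PROOFS =====

theorem foldl_append_init (c : List (List Int)) (a : List Int) :
    c.foldl (· ++ ·) a = a ++ c.foldl (· ++ ·) [] := by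
  induction c generalizing a with
  | nil => simp
  | cons x xs ih =>
    rw [List.foldl_cons, List.foldl_cons, ih (a ++ x), ih ([] ++ x)]
    simp

theorem flatten_cons (x : List Int) (c : List (List Int)) :
    (x :: c).foldl (· ++ ·) ([] : List Int) = x ++ c.foldl (· ++ ·) [] := by
  rw [List.foldl_cons, List.nil_append, foldl_append_init]

theorem inner_foldl (R : List (List Int)) (p : List Int) (acc : List (List Int)) :
    R.foldl (fun ret right => ret ++ [p ++ right]) acc = acc ++ R.map (p ++ ·) := by
  induction R generalizing acc with
  | nil => simp
  | cons r rs ih => simp [ih]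

theorem outer_foldl (P R : List (List Int)) (acc : List (List Int)) :
    P.foldl (fun ret p => R.foldl (fun ret right => ret ++ [p ++ right]) ret) acc
      = acc ++ P.flatMap (fun p => R.map (p ++ ·)) := by
  induction P generalizing acc with
  | nil => simp
  | cons p ps ih =>
    rw [List.foldl_cons, inner_foldl, ih]
    simp

theorem main_equiv (n : Nat) :
    ∀ (intervals : List (List Int)) (cur_idx : Int),
      ((intervals.length : Int) - cur_idx).toNat = n →
      -(intervals.length : Int) ≤ cur_idx →
      recursive_perm intervals cur_idx = recursive_perm_alt intervals cur_idx := by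
  induction n with
  | zero =>
    intro intervals cur_idx hn _
    have hge : cur_idx ≥ (intervals.length : Int) := by omega
    rw [recursive_perm, recursive_perm_alt, pvPoolsB,
      dif_pos hge, dif_neg (not_lt.mpr hge)]
    simp [pyProduct]
  | succ n ih =>
    intro intervals cur_idx hn hpre
    have hlt : cur_idx < (intervals.length : Int) := by omega
    have hget : ∃ cur, PySem.List.pyGet? intervals cur_idx = some cur := by
      cases hg : PySem.List.pyGet? intervals cur_idx with
      | some c => exact ⟨c, rfl⟩
      | none =>
        rw [PySem.List.pyGet?_eq_none_iff] at hg
        exact absurd ⟨by omega, by omega⟩ hg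
    obtain ⟨cur, hcur⟩ := hget
    have ihx : recursive_perm intervals (cur_idx + 1) = recursive_perm_alt intervals (cur_idx + 1) :=
      ih intervals (cur_idx + 1) (by omega) (by omega)
    rw [recursive_perm, dif_neg (not_le.mpr hlt)]
    rw [recursive_perm_alt, pvPoolsB, dif_pos hlt]
    simp only [hcur]
    rw [outer_foldl, ihx, recursive_perm_alt]
    simp only [pyProduct, List.nil_append, List.map_flatMap, List.map_map]
    congr 1
    funext p
    congr 1
    funext combo
    simp only [Function.comp]
    rw [flatten_cons]

-- ===== VERDICT (by name: the statement is the Claim_ definition above) =====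
theorem recursive_perm_spec : Claim_equal_recursive_perm := by
  intro intervals cur_idx _ hpre
  exact main_equiv _ intervals cur_idx rfl hpre
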